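-- pv_equiv track=rewrite | github.com/cea-hpc/pcocc | lib/pcocc/Oci.py | _parse_right
-- ===== SOURCE A (Python) =====
-- def _parse_right(txtright):
--     bin_rep = "0"
--     for e in txtright[1:]:
--         if e != "-":
--             bin_rep += "1"
--         else:
--             bin_rep += "0"
--     return int(bin_rep, base=2)
-- ===== SOURCE B (Python) =====
-- def _parse_right(txtright):
--     result = 0
--     for e in txtright[1:]:
--         result = result * 2 + (0 if e == "-" else 1)
--     return result
-- ===== Notes on version B (the rewrite author's own statement) =====
-- stated objective: simpler
-- what changed: Replaces the build-a-binary-string-then-int(...,2) two-phase approach with a single arithmetic fold on an integer accumulator; no intermediate string is created.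
import Mathlib
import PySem

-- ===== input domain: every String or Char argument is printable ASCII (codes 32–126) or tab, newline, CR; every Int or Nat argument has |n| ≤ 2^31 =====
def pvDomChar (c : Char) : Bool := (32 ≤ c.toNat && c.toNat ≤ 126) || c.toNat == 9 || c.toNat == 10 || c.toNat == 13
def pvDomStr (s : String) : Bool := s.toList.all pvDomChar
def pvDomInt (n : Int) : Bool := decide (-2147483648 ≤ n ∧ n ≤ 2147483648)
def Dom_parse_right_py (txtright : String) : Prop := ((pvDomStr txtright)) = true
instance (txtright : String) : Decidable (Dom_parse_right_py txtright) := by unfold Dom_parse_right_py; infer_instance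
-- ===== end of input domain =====

-- B replaces the build-binary-string-then-parse approach with a single arithmetic fold (objective: simpler).


-- ===== PORT A =====
-- hand port of Python's int(s, base=2): exact for strings consisting only of '0'/'1'
-- (which is all A ever passes to it)
def pvIntBase2 (s : List Char) : Int :=
  s.foldl (fun acc c => acc * 2 + (if c = '1' then 1 else 0)) 0

def parse_right_py (txtright : String) : Int :=
  let bin_rep := (PySem.List.slice txtright.toList (some 1) none).foldl
    (fun b e => b ++ [if e ≠ '-' then '1' else '0']) ['0']
  pvIntBase2 bin_rep

-- ===== PORT B =====
def parse_right_py_alt (txtright : String) : Int :=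
  (PySem.List.slice txtright.toList (some 1) none).foldl
    (fun result e => result * 2 + (if e = '-' then 0 else 1)) 0

-- ===== PRECONDITION & SPEC =====
def Spec_parse_right_py (txtright : String) (out : Int) : Prop := out = parse_right_py_alt txtright
instance (txtright : String) (out : Int) : Decidable (Spec_parse_right_py txtright out) := by unfold Spec_parse_right_py; infer_instance

-- ===== CLAIM (what is proved, stated in full; the proofs are below) =====
def Claim_equal_parse_right_py : Prop := ∀ (txtright : String), Dom_parse_right_py txtright → Spec_parse_right_py txtright (parse_right_py txtright)

-- ===== LEMMAS AND PROOFS =====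

theorem pvIntBase2_append_one (s : List Char) (c : Char) :
    pvIntBase2 (s ++ [c]) = pvIntBase2 s * 2 + (if c = '1' then 1 else 0) := by
  simp [pvIntBase2, List.foldl_append]

theorem pv_fold_eq (l : List Char) (s : List Char) :
    pvIntBase2 (l.foldl (fun b e => b ++ [if e ≠ '-' then '1' else '0']) s)
      = l.foldl (fun result e => result * 2 + (if e = '-' then 0 else 1)) (pvIntBase2 s) := by
  induction l generalizing s with
  | nil => rfl
  | cons c cs ih =>
    simp only [List.foldl_cons, ih, pvIntBase2_append_one]
    by_cases h : c = '-' <;> simp [h]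

-- ===== VERDICT (by name: the statement is the Claim_ definition above) =====
theorem parse_right_py_spec : Claim_equal_parse_right_py := by
  intro txtright _
  unfold Spec_parse_right_py parse_right_py parse_right_py_alt
  simp only [pv_fold_eq]
  rfl
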